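-- pv_equiv track=rewrite | github.com/misterk72/routine | scripts/compare_gb_measurements.py | compute_sleep_sessions
-- ===== SOURCE A (Python) =====
-- MIN_SLEEP_SESSION_SECONDS = 5 * 60
--
-- MAX_WAKE_PHASE_SECONDS = 2 * 60 * 60
--
-- def compute_sleep_sessions(samples):
--     sessions = []
--     prev = None
--     sleep_start = None
--     sleep_end = None
--     light = deep = 0
--     duration_since_last_sleep = 0
--
--     def finalize():
--         if sleep_start is None or sleep_end is None:
--             return
--         duration = light + deep
--         if sleep_end - sleep_start > MIN_SLEEP_SESSION_SECONDS and duration > MIN_SLEEP_SESSION_SECONDS: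
--             sessions.append((sleep_start, sleep_end))
--
--     for sample in samples:
--         if sample[1] != 0:
--             if sleep_start is None:
--                 sleep_start = sample[0]
--             sleep_end = sample[0]
--             duration_since_last_sleep = 0
--         else:
--             finalize()
--             sleep_start = sleep_end = None
--             light = deep = 0
--
--         if prev is not None:
--             delta = sample[0] - prev[0]
--             if sample[1] == 1:
--                 light += delta
--             elif sample[1] == 2:
--                 deep += delta
--             else:
--                 duration_since_last_sleep += delta
--                 if sleep_start is not None and duration_since_last_sleep > MAX_WAKE_PHASE_SECONDS:
--                     finalize()
--                     sleep_start = sleep_end = None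
--                     light = deep = 0
--         prev = sample
--
--     if sleep_start is not None and sleep_end is not None:
--         duration = light + deep
--         if duration > MIN_SLEEP_SESSION_SECONDS:
--             sessions.append((sleep_start, sleep_end))
--     return sessions
-- ===== SOURCE B (Python) =====
-- MIN_SLEEP_SESSION_SECONDS = 5 * 60
--
-- MAX_WAKE_PHASE_SECONDS = 2 * 60 * 60
--
--
-- def compute_sleep_sessions(samples):
--     # Per-session decomposition: an outer loop finds the start of each session
--     # (the next sample with a nonzero stage); an inner loop consumes that one
--     # session, accumulating its light/deep totals, until a zero-stage sample or
--     # a single gap longer than MAX_WAKE_PHASE_SECONDS closes it (or the input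
--     # ends, leaving a trailing session).  The session is emitted immediately
--     # with the appropriate acceptance test.
--     sessions = []
--     n = len(samples)
--     i = 0
--     while i < n:
--         if samples[i][1] == 0:
--             i += 1
--             continue
--         start = samples[i][0]
--         end = start
--         light = deep = 0
--         closed = False
--         j = i
--         while j < n and samples[j][1] != 0:
--             t, s = samples[j]
--             end = t
--             if j > 0:
--                 delta = t - samples[j - 1][0]
--                 if s == 1:
--                     light += delta
--                 elif s == 2:
--                     deep += delta
--                 elif delta > MAX_WAKE_PHASE_SECONDS:
--                     closed = True
--             j += 1
--             if closed:
--                 break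
--         if not closed and j < n:
--             closed = True  # stopped on a zero-stage sample
--         if closed:
--             if end - start > MIN_SLEEP_SESSION_SECONDS and light + deep > MIN_SLEEP_SESSION_SECONDS:
--                 sessions.append((start, end))
--         elif light + deep > MIN_SLEEP_SESSION_SECONDS:
--             sessions.append((start, end))
--         i = j
--     return sessions
-- ===== Notes on version B (the rewrite author's own statement) =====
-- stated objective: alternative
-- what changed: B replaces A's single left-to-right fold with optional session state and a finalize closure by a per-session nested-loop decomposition: an outer loop scans for the start of each session, an inner loop consumes that one session accumulating its light/deep totals and deciding how it closed, and each session is emitted immediately with the matching acceptance test (span+duration for mid-stream closes, duration only for a trailing session).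
import Mathlib
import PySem

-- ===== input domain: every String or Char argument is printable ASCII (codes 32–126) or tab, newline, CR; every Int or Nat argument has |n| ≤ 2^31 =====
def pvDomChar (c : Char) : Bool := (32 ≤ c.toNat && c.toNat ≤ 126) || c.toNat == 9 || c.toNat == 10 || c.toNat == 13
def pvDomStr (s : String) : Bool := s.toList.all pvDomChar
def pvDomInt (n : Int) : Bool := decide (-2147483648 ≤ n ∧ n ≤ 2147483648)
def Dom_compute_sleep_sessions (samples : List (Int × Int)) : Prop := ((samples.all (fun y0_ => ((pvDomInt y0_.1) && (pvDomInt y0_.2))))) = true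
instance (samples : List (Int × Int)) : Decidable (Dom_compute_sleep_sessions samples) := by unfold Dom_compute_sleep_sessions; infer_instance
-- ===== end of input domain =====

-- B replaces A's single-pass option-state machine by a per-session nested loop:
-- an outer loop finds each session start, an inner loop consumes that session;
-- objective: alternative decomposition, same cost.

-- ===== PORT A =====
structure PvStA where
  sessions : List (Int × Int)
  prev : Option (Int × Int)
  ss : Option Int
  se : Option Int
  light : Int
  deep : Int
  wake : Int
deriving DecidableEq, Repr

def pvFinalizeA (sessions : List (Int × Int)) (ss se : Option Int) (light deep : Int) : List (Int × Int) :=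
  match ss, se with
  | some a, some b =>
      if b - a > 300 ∧ light + deep > 300 then sessions ++ [(a, b)] else sessions
  | _, _ => sessions

def pvStepA (st : PvStA) (sample : Int × Int) : PvStA :=
  let t := sample.1
  let s := sample.2
  let st1 : PvStA :=
    if s ≠ 0 then
      { st with ss := (match st.ss with | none => some t | some a => some a),
                se := some t, wake := 0 }
    else
      { st with sessions := pvFinalizeA st.sessions st.ss st.se st.light st.deep,
                ss := none, se := none, light := 0, deep := 0 }
  let st2 : PvStA :=
    match st.prev with
    | none => st1
    | some p =>
      let delta := t - p.1
      if s = 1 then { st1 with light := st1.light + delta }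
      else if s = 2 then { st1 with deep := st1.deep + delta }
      else
        let w := st1.wake + delta
        if st1.ss.isSome ∧ w > 7200 then
          { st1 with sessions := pvFinalizeA st1.sessions st1.ss st1.se st1.light st1.deep,
                     ss := none, se := none, light := 0, deep := 0, wake := w }
        else { st1 with wake := w }
  { st2 with prev := some sample }

def compute_sleep_sessions (samples : List (Int × Int)) : List (Int × Int) :=
  let st := samples.foldl pvStepA ⟨[], none, none, none, 0, 0, 0⟩
  match st.ss, st.se with
  | some a, some b => if st.light + st.deep > 300 then st.sessions ++ [(a, b)] else st.sessions
  | _, _ => st.sessions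

-- ===== PORT B =====
-- inner loop: consume one session starting at index j; returns
-- (index after loop exit, end, light, deep, closed).  The Nat fuel only makes
-- the while-loop total; any fuel ≥ samples.length - j gives the loop's value.
def pvInnerB (samples : List (Int × Int)) : Nat → Nat → Int → Int → Int → Nat × Int × Int × Int × Bool
  | 0, j, en, light, deep => (j, en, light, deep, decide (j < samples.length))
  | fuel + 1, j, en, light, deep =>
    if j < samples.length ∧ (samples.getD j (0, 0)).2 ≠ 0 then
      let t := (samples.getD j (0, 0)).1
      let s := (samples.getD j (0, 0)).2
      if 0 < j then
        let delta := t - (samples.getD (j - 1) (0, 0)).1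
        if s = 1 then pvInnerB samples fuel (j + 1) t (light + delta) deep
        else if s = 2 then pvInnerB samples fuel (j + 1) t light (deep + delta)
        else if delta > 7200 then (j + 1, t, light, deep, true)
        else pvInnerB samples fuel (j + 1) t light deep
      else pvInnerB samples fuel (j + 1) t light deep
    else (j, en, light, deep, decide (j < samples.length))

-- outer loop: find the next session start, emit the session the inner loop found
def pvOuterB (samples : List (Int × Int)) : Nat → Nat → List (Int × Int)
  | 0, _ => []
  | fuel + 1, i =>
    if i < samples.length then
      if (samples.getD i (0, 0)).2 = 0 then pvOuterB samples fuel (i + 1)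
      else
        let start := (samples.getD i (0, 0)).1
        let r := pvInnerB samples samples.length i start 0 0
        (if r.2.2.2.2 then
           (if r.2.1 - start > 300 ∧ r.2.2.1 + r.2.2.2.1 > 300 then [(start, r.2.1)] else [])
         else (if r.2.2.1 + r.2.2.2.1 > 300 then [(start, r.2.1)] else [])) ++
          pvOuterB samples fuel r.1
    else []

def compute_sleep_sessions_alt (samples : List (Int × Int)) : List (Int × Int) :=
  pvOuterB samples samples.length 0

-- ===== PRECONDITION & SPEC =====
def Spec_compute_sleep_sessions (samples : List (Int × Int)) (out : List (Int × Int)) : Prop := out = compute_sleep_sessions_alt samples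
instance (samples : List (Int × Int)) (out : List (Int × Int)) : Decidable (Spec_compute_sleep_sessions samples out) := by unfold Spec_compute_sleep_sessions; infer_instance

-- ===== CLAIM =====
def Claim_equal_compute_sleep_sessions : Prop := ∀ (samples : List (Int × Int)), Dom_compute_sleep_sessions samples → Spec_compute_sleep_sessions samples (compute_sleep_sessions samples)

-- ===== LEMMAS AND PROOFS =====

-- A's post-loop trailing finalization
def pvFinishA (st : PvStA) : List (Int × Int) :=
  match st.ss, st.se with
  | some a, some b => if st.light + st.deep > 300 then st.sessions ++ [(a, b)] else st.sessions
  | _, _ => st.sessions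

-- prev of A's state at index i
def pvPrevAt (samples : List (Int × Int)) (i : Nat) : Option (Int × Int) :=
  if i = 0 then none else some (samples.getD (i - 1) (0, 0))

-- one-step evaluation lemmas for A's transition function
theorem pvStepA_none_nz (acc : List (Int × Int)) (w t s : Int) (hs : s ≠ 0) :
    pvStepA ⟨acc, none, none, none, 0, 0, w⟩ (t, s) = ⟨acc, some (t, s), some t, some t, 0, 0, 0⟩ := by
  simp [pvStepA, hs]

theorem pvStepA_none_z (acc : List (Int × Int)) (w t : Int) :
    pvStepA ⟨acc, none, none, none, 0, 0, w⟩ (t, 0) = ⟨acc, some (t, 0), none, none, 0, 0, w⟩ := by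
  simp [pvStepA, pvFinalizeA]

theorem pvStepA_closed_z (acc : List (Int × Int)) (q : Int × Int) (w t : Int) :
    pvStepA ⟨acc, some q, none, none, 0, 0, w⟩ (t, 0)
      = ⟨acc, some (t, 0), none, none, 0, 0, w + (t - q.1)⟩ := by
  simp [pvStepA, pvFinalizeA]

theorem pvStepA_closed_one (acc : List (Int × Int)) (q : Int × Int) (w t : Int) :
    pvStepA ⟨acc, some q, none, none, 0, 0, w⟩ (t, 1)
      = ⟨acc, some (t, 1), some t, some t, 0 + (t - q.1), 0, 0⟩ := by
  simp [pvStepA]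

theorem pvStepA_closed_two (acc : List (Int × Int)) (q : Int × Int) (w t : Int) :
    pvStepA ⟨acc, some q, none, none, 0, 0, w⟩ (t, 2)
      = ⟨acc, some (t, 2), some t, some t, 0, 0 + (t - q.1), 0⟩ := by
  simp [pvStepA]

theorem pvStepA_closed_to (acc : List (Int × Int)) (q : Int × Int) (w t s : Int)
    (hs0 : s ≠ 0) (hs1 : s ≠ 1) (hs2 : s ≠ 2) (hd : t - q.1 > 7200) :
    pvStepA ⟨acc, some q, none, none, 0, 0, w⟩ (t, s)
      = ⟨acc, some (t, s), none, none, 0, 0, 0 + (t - q.1)⟩ := by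
  simp [pvStepA, pvFinalizeA, hs0, hs1, hs2, hd]

theorem pvStepA_closed_nto (acc : List (Int × Int)) (q : Int × Int) (w t s : Int)
    (hs0 : s ≠ 0) (hs1 : s ≠ 1) (hs2 : s ≠ 2) (hd : ¬ t - q.1 > 7200) :
    pvStepA ⟨acc, some q, none, none, 0, 0, w⟩ (t, s)
      = ⟨acc, some (t, s), some t, some t, 0, 0, 0 + (t - q.1)⟩ := by
  simp [pvStepA, hs0, hs1, hs2, hd]

theorem pvStepA_open_z (acc : List (Int × Int)) (q : Int × Int) (st en l d w t : Int) :
    pvStepA ⟨acc, some q, some st, some en, l, d, w⟩ (t, 0)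
      = ⟨pvFinalizeA acc (some st) (some en) l d, some (t, 0), none, none, 0, 0, w + (t - q.1)⟩ := by
  simp [pvStepA]

theorem pvStepA_open_one (acc : List (Int × Int)) (q : Int × Int) (st en l d w t : Int) :
    pvStepA ⟨acc, some q, some st, some en, l, d, w⟩ (t, 1)
      = ⟨acc, some (t, 1), some st, some t, l + (t - q.1), d, 0⟩ := by
  simp [pvStepA]

theorem pvStepA_open_two (acc : List (Int × Int)) (q : Int × Int) (st en l d w t : Int) :
    pvStepA ⟨acc, some q, some st, some en, l, d, w⟩ (t, 2)
      = ⟨acc, some (t, 2), some st, some t, l, d + (t - q.1), 0⟩ := by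
  simp [pvStepA]

theorem pvStepA_open_to (acc : List (Int × Int)) (q : Int × Int) (st en l d w t s : Int)
    (hs0 : s ≠ 0) (hs1 : s ≠ 1) (hs2 : s ≠ 2) (hd : t - q.1 > 7200) :
    pvStepA ⟨acc, some q, some st, some en, l, d, w⟩ (t, s)
      = ⟨pvFinalizeA acc (some st) (some t) l d, some (t, s), none, none, 0, 0, 0 + (t - q.1)⟩ := by
  simp [pvStepA, hs0, hs1, hs2, hd]

theorem pvStepA_open_nto (acc : List (Int × Int)) (q : Int × Int) (st en l d w t s : Int)
    (hs0 : s ≠ 0) (hs1 : s ≠ 1) (hs2 : s ≠ 2) (hd : ¬ t - q.1 > 7200) :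
    pvStepA ⟨acc, some q, some st, some en, l, d, w⟩ (t, s)
      = ⟨acc, some (t, s), some st, some t, l, d, 0 + (t - q.1)⟩ := by
  simp [pvStepA, hs0, hs1, hs2, hd]

theorem pvFinalizeA_some (acc : List (Int × Int)) (a b l d : Int) :
    pvFinalizeA acc (some a) (some b) l d
      = acc ++ (if b - a > 300 ∧ l + d > 300 then [(a, b)] else []) := by
  simp [pvFinalizeA]; split_ifs <;> simp

-- the emitted segment + continuation for an inner-loop result
def pvEmit (samples : List (Int × Int)) (fo : Nat) (st : Int) (r : Nat × Int × Int × Int × Bool) : List (Int × Int) :=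
  (if r.2.2.2.2 then
     (if r.2.1 - st > 300 ∧ r.2.2.1 + r.2.2.2.1 > 300 then [(st, r.2.1)] else [])
   else (if r.2.2.1 + r.2.2.2.1 > 300 then [(st, r.2.1)] else [])) ++ pvOuterB samples fo r.1

theorem pvOuterB_stop (samples : List (Int × Int)) (F i : Nat) (h : ¬ i < samples.length) :
    pvOuterB samples F i = [] := by
  cases F <;> simp [pvOuterB, h]

theorem pvOuterB_skip (samples : List (Int × Int)) (F i : Nat) (h : i < samples.length)
    (hz : (samples.getD i (0, 0)).2 = 0) :
    pvOuterB samples (F + 1) i = pvOuterB samples F (i + 1) := by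
  simp only [pvOuterB]
  rw [if_pos h, if_pos hz]

theorem pvOuterB_sess (samples : List (Int × Int)) (F i : Nat) (h : i < samples.length)
    (hz : ¬ (samples.getD i (0, 0)).2 = 0) :
    pvOuterB samples (F + 1) i
      = pvEmit samples F (samples.getD i (0, 0)).1
          (pvInnerB samples samples.length i (samples.getD i (0, 0)).1 0 0) := by
  simp only [pvOuterB]
  rw [if_pos h, if_neg hz]
  rfl

theorem pvInnerB_stop (samples : List (Int × Int)) (fi j : Nat) (en l d : Int)
    (h : ¬ (j < samples.length ∧ (samples.getD j (0, 0)).2 ≠ 0)) :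
    pvInnerB samples fi j en l d = (j, en, l, d, decide (j < samples.length)) := by
  cases fi
  · simp only [pvInnerB]
  · simp only [pvInnerB]; rw [if_neg h]

-- any two sufficient fuels give the inner while-loop's value
theorem pvInnerB_fuel (samples : List (Int × Int)) (f1 : Nat) :
    ∀ (f2 j : Nat) (en l d : Int), samples.length - j ≤ f1 → samples.length - j ≤ f2 →
      pvInnerB samples f1 j en l d = pvInnerB samples f2 j en l d := by
  induction f1 with
  | zero =>
    intro f2 j en l d h1 h2
    have hj : ¬ (j < samples.length ∧ (samples.getD j (0, 0)).2 ≠ 0) := by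
      intro hc; omega
    rw [pvInnerB_stop samples 0 j en l d hj, pvInnerB_stop samples f2 j en l d hj]
  | succ f1 ih =>
    intro f2 j en l d h1 h2
    by_cases hj : j < samples.length ∧ (samples.getD j (0, 0)).2 ≠ 0
    · rcases f2 with _ | f2
      · omega
      · simp only [pvInnerB]
        rw [if_pos hj, if_pos hj]
        have hrec := fun en l d => ih f2 (j + 1) en l d (by omega) (by omega)
        split_ifs <;> simp [hrec]
    · rw [pvInnerB_stop samples (f1 + 1) j en l d hj, pvInnerB_stop samples f2 j en l d hj]

-- a self-similar unfolding of the inner loop at the canonical fuel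
theorem pvInnerB_unfold (samples : List (Int × Int)) (j : Nat) (en l d : Int)
    (h : j < samples.length) (hz : (samples.getD j (0, 0)).2 ≠ 0) :
    pvInnerB samples samples.length j en l d
      = (if 0 < j then
           (if (samples.getD j (0, 0)).2 = 1 then
              pvInnerB samples samples.length (j + 1) (samples.getD j (0, 0)).1
                (l + ((samples.getD j (0, 0)).1 - (samples.getD (j - 1) (0, 0)).1)) d
            else if (samples.getD j (0, 0)).2 = 2 then
              pvInnerB samples samples.length (j + 1) (samples.getD j (0, 0)).1 l
                (d + ((samples.getD j (0, 0)).1 - (samples.getD (j - 1) (0, 0)).1))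
            else if (samples.getD j (0, 0)).1 - (samples.getD (j - 1) (0, 0)).1 > 7200 then
              (j + 1, (samples.getD j (0, 0)).1, l, d, true)
            else pvInnerB samples samples.length (j + 1) (samples.getD j (0, 0)).1 l d)
         else pvInnerB samples samples.length (j + 1) (samples.getD j (0, 0)).1 l d) := by
  rcases hn : samples.length with _ | m
  · omega
  · have hfuel := fun en l d => pvInnerB_fuel samples m (m + 1) (j + 1) en l d
      (by omega) (by omega)
    rw [← hn]
    conv_lhs => rw [hn]
    simp only [pvInnerB]
    rw [if_pos ⟨h, hz⟩]
    rw [← hn] at hfuel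
    split_ifs <;> simp [hfuel, hn]

-- the two fold invariants (closed state / open state), by induction on samples.length - i
theorem pvL (samples : List (Int × Int)) (k : Nat) :
    ∀ i : Nat, samples.length - i = k →
    (∀ F : Nat, samples.length - i ≤ F → ∀ (acc : List (Int × Int)) (w : Int),
      pvFinishA ((samples.drop i).foldl pvStepA ⟨acc, pvPrevAt samples i, none, none, 0, 0, w⟩)
        = acc ++ pvOuterB samples F i) ∧
    (0 < i →
      ∀ fo : Nat, samples.length - i ≤ fo →
      ∀ (acc : List (Int × Int)) (st en l d w : Int),
        pvFinishA ((samples.drop i).foldl pvStepA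
            ⟨acc, some (samples.getD (i - 1) (0, 0)), some st, some en, l, d, w⟩)
          = acc ++ pvEmit samples fo st (pvInnerB samples samples.length i en l d)) := by
  induction k with
  | zero =>
    intro i hk
    have hin : ¬ i < samples.length := by omega
    have hdrop : samples.drop i = [] := List.drop_eq_nil_of_le (by omega)
    constructor
    · intro F hF acc w
      rw [hdrop, pvOuterB_stop samples F i hin]
      simp [pvFinishA, pvPrevAt]
    · intro hpos fo hfo acc st en l d w
      rw [hdrop]
      rw [pvInnerB_stop samples samples.length i en l d (by simp [hin])]
      rw [pvEmit]
      simp only [List.foldl_nil, pvFinishA, pvOuterB_stop samples fo i hin]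
      simp [decide_eq_false hin]
      split <;> simp
  | succ k ih =>
    intro i hk
    have hin : i < samples.length := by omega
    obtain ⟨ih1, ih2⟩ := ih (i + 1) (by omega)
    have ih2 := ih2 (Nat.succ_pos i)
    simp only [Nat.add_sub_cancel] at ih2
    have hdrop : samples.drop i = samples.getD i (0, 0) :: samples.drop (i + 1) := by
      rw [List.drop_eq_getElem_cons hin]
      congr 1
      exact (List.getD_eq_getElem samples (0, 0) hin).symm
    have hprev1 : pvPrevAt samples (i + 1) = some (samples.getD i (0, 0)) := by
      simp [pvPrevAt]
    rcases hg : samples.getD i (0, 0) with ⟨t, s⟩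
    rw [hg] at hdrop hprev1 ih2
    rw [hprev1] at ih1
    constructor
    · intro F hF acc w
      rcases F with _ | F
      · omega
      rw [hdrop, List.foldl_cons]
      by_cases hs0 : s = 0
      · subst hs0
        rw [pvOuterB_skip samples F i hin (by rw [hg])]
        by_cases hi0 : i = 0
        · rw [show pvPrevAt samples i = none by simp [pvPrevAt, hi0]]
          rw [pvStepA_none_z, ih1 F (by omega)]
        · rw [show pvPrevAt samples i = some (samples.getD (i - 1) (0, 0)) by
            simp [pvPrevAt, hi0]]
          rw [pvStepA_closed_z, ih1 F (by omega)]
      · rw [pvOuterB_sess samples F i hin (by rw [hg]; exact hs0), hg]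
        rw [pvInnerB_unfold samples i t 0 0 hin (by rw [hg]; exact hs0)]
        simp only [hg]
        by_cases hi0 : i = 0
        · rw [show pvPrevAt samples i = none by simp [pvPrevAt, hi0]]
          rw [if_neg (by omega)]
          rw [pvStepA_none_nz acc w t s hs0]
          exact ih2 F (by omega) acc t t 0 0 0
        · rw [show pvPrevAt samples i = some (samples.getD (i - 1) (0, 0)) by
            simp [pvPrevAt, hi0]]
          rw [if_pos (by omega)]
          by_cases hs1 : s = 1
          · subst hs1
            rw [if_pos rfl, pvStepA_closed_one]
            exact ih2 F (by omega) acc t t _ 0 0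
          · rw [if_neg hs1]
            by_cases hs2 : s = 2
            · subst hs2
              rw [if_pos rfl, pvStepA_closed_two]
              exact ih2 F (by omega) acc t t 0 _ 0
            · rw [if_neg hs2]
              by_cases hd : t - (samples.getD (i - 1) (0, 0)).1 > 7200
              · rw [if_pos hd, pvStepA_closed_to acc _ w t s hs0 hs1 hs2 hd,
                  ih1 F (by omega)]
                rw [pvEmit]
                simp
              · rw [if_neg hd, pvStepA_closed_nto acc _ w t s hs0 hs1 hs2 hd]
                exact ih2 F (by omega) acc t t 0 0 _
    · intro hpos fo hfo acc st en l d w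
      rw [hdrop, List.foldl_cons]
      by_cases hs0 : s = 0
      · subst hs0
        rcases fo with _ | fo
        · omega
        rw [pvStepA_open_z, ih1 fo (by omega), pvFinalizeA_some]
        rw [pvInnerB_stop samples samples.length i en l d (by rw [hg]; simp)]
        rw [pvEmit]
        simp only [decide_eq_true hin]
        rw [pvOuterB_skip samples fo i hin (by rw [hg])]
        simp
      · rw [pvInnerB_unfold samples i en l d hin (by rw [hg]; exact hs0)]
        simp only [hg]
        rw [if_pos hpos]
        by_cases hs1 : s = 1
        · subst hs1
          rw [if_pos rfl, pvStepA_open_one]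
          exact ih2 fo (by omega) acc st t _ d 0
        · rw [if_neg hs1]
          by_cases hs2 : s = 2
          · subst hs2
            rw [if_pos rfl, pvStepA_open_two]
            exact ih2 fo (by omega) acc st t l _ 0
          · rw [if_neg hs2]
            by_cases hd : t - (samples.getD (i - 1) (0, 0)).1 > 7200
            · rw [if_pos hd, pvStepA_open_to acc _ st en l d w t s hs0 hs1 hs2 hd,
                ih1 fo (by omega), pvFinalizeA_some, pvEmit]
              simp [List.append_assoc]
            · rw [if_neg hd, pvStepA_open_nto acc _ st en l d w t s hs0 hs1 hs2 hd]
              exact ih2 fo (by omega) acc st t l d _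

-- ===== VERDICT =====
theorem compute_sleep_sessions_spec : Claim_equal_compute_sleep_sessions := by
  intro samples _
  unfold Spec_compute_sleep_sessions compute_sleep_sessions compute_sleep_sessions_alt
  have h := (pvL samples samples.length 0 (by omega)).1 samples.length (by omega) [] 0
  simpa [pvFinishA, pvPrevAt] using h
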